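-- pv_equiv track=rewrite | github.com/cereal-lab/cde-search | approx.py | maj_approx_strategy
-- ===== SOURCE A (Python) =====
-- from typing import Optional
--
-- def maj_approx_strategy(interactions: list[list[Optional[int]]], kind = "column", default_value = 0) -> None:
--     row_counts = [{} for _ in range(len(interactions))]
--     column_counts = [{} for _ in range(len(interactions[0]))]
--     for test_id in range(len(interactions)):
--         for candidate_id in range(len(interactions[0])):
--             outcome = interactions[test_id][candidate_id]
--             if outcome is not None:
--                 column_counts[candidate_id][outcome] = column_counts[candidate_id].get(outcome, 0) + 1
--     for candidate_id in range(len(interactions[0])):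
--         for test_id in range(len(interactions)):
--             outcome = interactions[test_id][candidate_id]
--             if outcome is not None:
--                 row_counts[test_id][outcome] = row_counts[test_id].get(outcome, 0) + 1
--     approx_vector = []
--     for test_id, test in enumerate(interactions):
--         rc = row_counts[test_id] if kind != "column" else {}
--         for candidate_id, outcome in enumerate(test):
--             if outcome is None:
--                 cc = column_counts[candidate_id] if kind != "row" else {}
--                 all_outcomes = set(rc.keys()).union(cc.keys())
--                 counts = {}
--                 for outcome in all_outcomes:
--                     counts[outcome] = rc.get(outcome, 0) + cc.get(outcome, 0)
--                 max_outcome = default_value if len(counts) == 0 else max(all_outcomes, key = lambda x: (counts[x], -x))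
--                 interactions[test_id][candidate_id] = max_outcome
--                 approx_vector.append(max_outcome)
--     return approx_vector
-- ===== SOURCE B (Python) =====
-- def maj_approx_strategy(interactions, kind="column", default_value=0):
--     # Same return value as A; also fills the None cells of `interactions` in place like A does.
--     def vote(vals):
--         if not vals:
--             return default_value
--         cnt = {}
--         for x in vals:
--             cnt[x] = cnt.get(x, 0) + 1
--         return max(cnt, key=lambda x: (cnt[x], -x))
--     col_vals = [[x for x in col if x is not None] for col in zip(*interactions)]
--     row_vals = [[x for x in row if x is not None] for row in interactions]
--     col_best = [vote(v) for v in col_vals]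
--     row_best = [vote(v) for v in row_vals]
--     out = []
--     for i, row in enumerate(interactions):
--         for j, x in enumerate(row):
--             if x is None:
--                 if kind == "column":
--                     v = col_best[j]
--                 elif kind == "row":
--                     v = row_best[i]
--                 else:
--                     v = vote(row_vals[i] + col_vals[j])
--                 row[j] = v
--                 out.append(v)
--     return out
-- ===== Notes on version B (the rewrite author's own statement) =====
-- stated objective: alternative
-- what changed: Replaces A's per-cell dict-union-and-argmax over precomputed row/column counter dicts by per-column and per-row winners precomputed once (a majority vote with key (count,-x) over each line's observed values), used directly for kind 'column'/'row'; only for other kinds does it vote per cell over the concatenated row and column values; no per-cell dicts of A's shape are built.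
-- outside the precondition, e.g. on maj_approx_strategy([], 'column', 0): A raises IndexError, B returns []; on maj_approx_strategy([[1, 2], [None, 2, 1, 1]], 'row', 0): A returns [2], B returns [1]
import Mathlib
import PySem

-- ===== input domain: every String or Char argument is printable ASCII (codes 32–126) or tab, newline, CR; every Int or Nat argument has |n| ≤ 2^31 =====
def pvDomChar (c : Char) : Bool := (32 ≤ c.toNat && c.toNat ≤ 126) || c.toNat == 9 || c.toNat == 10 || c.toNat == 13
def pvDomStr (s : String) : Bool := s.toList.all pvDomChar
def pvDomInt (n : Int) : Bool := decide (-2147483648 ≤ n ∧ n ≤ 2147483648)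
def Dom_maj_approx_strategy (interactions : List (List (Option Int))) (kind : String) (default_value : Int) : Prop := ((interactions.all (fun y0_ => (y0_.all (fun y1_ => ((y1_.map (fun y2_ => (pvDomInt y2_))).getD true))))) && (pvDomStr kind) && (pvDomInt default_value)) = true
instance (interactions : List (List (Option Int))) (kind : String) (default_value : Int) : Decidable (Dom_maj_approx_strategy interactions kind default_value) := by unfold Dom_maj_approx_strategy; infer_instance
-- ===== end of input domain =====

-- B replaces A's per-cell dict-union-and-argmax over precomputed row/column counter dicts by
-- per-column / per-row precomputed majority winners (a vote over the observed values with key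
-- (count, -x)); equivalence is about the RETURN value — both Pythons also fill the None cells of
-- `interactions` in place identically.

-- ===== PORT A =====
def maj_approx_strategy (interactions : List (List (Option Int))) (kind : String) (default_value : Int) : List Int :=
  let nrows : Int := PySem.List.len interactions
  let ncols : Int := PySem.List.len (PySem.List.pyGetD interactions 0 [])
  let row_counts0 : List (PySem.Dict Int Int) := (PySem.List.pyRange 0 nrows 1).map (fun _ => PySem.Dict.empty)
  let column_counts0 : List (PySem.Dict Int Int) := (PySem.List.pyRange 0 ncols 1).map (fun _ => PySem.Dict.empty)
  let column_counts := (PySem.List.pyRange 0 nrows 1).foldl (fun cc t =>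
      (PySem.List.pyRange 0 ncols 1).foldl (fun cc c =>
        match PySem.List.pyGetD (PySem.List.pyGetD interactions t []) c none with
        | none => cc
        | some o =>
          PySem.List.pySetD cc c
            ((PySem.List.pyGetD cc c PySem.Dict.empty).insert o
              ((PySem.List.pyGetD cc c PySem.Dict.empty).getD o 0 + 1))) cc) column_counts0
  let row_counts := (PySem.List.pyRange 0 ncols 1).foldl (fun rc c =>
      (PySem.List.pyRange 0 nrows 1).foldl (fun rc t =>
        match PySem.List.pyGetD (PySem.List.pyGetD interactions t []) c none with
        | none => rc
        | some o =>
          PySem.List.pySetD rc t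
            ((PySem.List.pyGetD rc t PySem.Dict.empty).insert o
              ((PySem.List.pyGetD rc t PySem.Dict.empty).getD o 0 + 1))) rc) row_counts0
  (PySem.List.enumerate interactions 0).foldl (fun av p =>
    let rc := if kind ≠ "column" then PySem.List.pyGetD row_counts p.1 PySem.Dict.empty else PySem.Dict.empty
    (PySem.List.enumerate p.2 0).foldl (fun av q =>
      match q.2 with
      | some _ => av
      | none =>
        let cc := if kind ≠ "row" then PySem.List.pyGetD column_counts q.1 PySem.Dict.empty else PySem.Dict.empty
        let all_outcomes := PySem.Set.union (PySem.Set.ofList rc.keys) cc.keys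
        let counts := all_outcomes.foldl (fun d x => d.insert x (rc.getD x 0 + cc.getD x 0)) PySem.Dict.empty
        let max_outcome := if counts.size = 0 then default_value
          else (PySem.List.max2? all_outcomes (fun x => counts.getD x 0) (fun x => -x)).getD default_value
        av ++ [max_outcome]) av) []

-- ===== PORT B =====
def pvVote (vals : List Int) (default_value : Int) : Int :=
  if vals = [] then default_value
  else (PySem.List.max2? (PySem.Dict.counter vals).keys
    (fun x => (PySem.Dict.counter vals).getD x 0) (fun x => -x)).getD default_value

-- hand port of zip(*rows): the j-th column for every j below the minimum row length; exact
def pvZipStar (rows : List (List (Option Int))) : List (List (Option Int)) :=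
  match rows with
  | [] => []
  | r :: rs =>
    (List.range (rs.foldl (fun m row => min m row.length) r.length)).map
      (fun j => rows.map (fun row => row.getD j none))

def maj_approx_strategy_alt (interactions : List (List (Option Int))) (kind : String) (default_value : Int) : List Int :=
  let colVals := (pvZipStar interactions).map (fun col => col.filterMap id)
  let rowVals := interactions.map (fun row => row.filterMap id)
  let colBest := colVals.map (fun v => pvVote v default_value)
  let rowBest := rowVals.map (fun v => pvVote v default_value)
  (PySem.List.enumerate interactions 0).foldl (fun out p =>
    (PySem.List.enumerate p.2 0).foldl (fun out q =>
      match q.2 with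
      | some _ => out
      | none =>
        let v := if kind = "column" then PySem.List.pyGetD colBest q.1 default_value
          else if kind = "row" then PySem.List.pyGetD rowBest p.1 default_value
          else pvVote (PySem.List.pyGetD rowVals p.1 [] ++ PySem.List.pyGetD colVals q.1 []) default_value
        out ++ [v]) out) []

-- ===== PRECONDITION & SPEC =====
-- Pre_ excludes the empty matrix (A raises IndexError on interactions[0]) and ragged matrices: on
-- most ragged inputs A raises IndexError, and where it happens to return (rows longer than the
-- first row, kind="row") its row counts silently ignore the cells beyond the first row's width, an
-- artefact of its implementation.
def Pre_maj_approx_strategy (interactions : List (List (Option Int))) (kind : String) (default_value : Int) : Prop :=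
  interactions ≠ [] ∧ ∀ row ∈ interactions, row.length = (interactions.headD []).length
instance (interactions : List (List (Option Int))) (kind : String) (default_value : Int) : Decidable (Pre_maj_approx_strategy interactions kind default_value) := by unfold Pre_maj_approx_strategy; infer_instance
def pvWitness_maj_approx_strategy : List (List (Option Int)) × String × Int :=
  ([[none, some 1], [some 0, none]], "column", 0)

def Spec_maj_approx_strategy (interactions : List (List (Option Int))) (kind : String) (default_value : Int) (out : List Int) : Prop := out = maj_approx_strategy_alt interactions kind default_value
instance (interactions : List (List (Option Int))) (kind : String) (default_value : Int) (out : List Int) : Decidable (Spec_maj_approx_strategy interactions kind default_value out) := by unfold Spec_maj_approx_strategy; infer_instance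

-- ===== CLAIM (what is proved, stated in full; the proofs are below) =====
def Claim_equal_maj_approx_strategy : Prop := ∀ (interactions : List (List (Option Int))) (kind : String) (default_value : Int), Dom_maj_approx_strategy interactions kind default_value → Pre_maj_approx_strategy interactions kind default_value → Spec_maj_approx_strategy interactions kind default_value (maj_approx_strategy interactions kind default_value)

-- ===== LEMMAS AND PROOFS =====
def pvKeyLe (f : Int → Int) (y m : Int) : Prop := f y < f m ∨ (f y = f m ∧ m ≤ y)
lemma pvKeyLe_refl (f : Int → Int) (a : Int) : pvKeyLe f a a := Or.inr ⟨rfl, le_refl a⟩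
lemma pvKeyLe_trans (f : Int → Int) {a b c : Int} (h1 : pvKeyLe f a b) (h2 : pvKeyLe f b c) :
    pvKeyLe f a c := by
  rcases h1 with h1 | ⟨h1, h1'⟩ <;> rcases h2 with h2 | ⟨h2, h2'⟩ <;> unfold pvKeyLe <;> omega
lemma pvKeyLe_antisymm (f : Int → Int) {a b : Int} (h1 : pvKeyLe f a b) (h2 : pvKeyLe f b a) :
    a = b := by
  rcases h1 with h1 | ⟨h1, h1'⟩ <;> rcases h2 with h2 | ⟨h2, h2'⟩ <;> omega
-- the fold step of PySem.List.max2? with keys (f x, -x)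
def pvStep (f : Int → Int) (acc : Option Int) (x : Int) : Option Int :=
  match acc with
  | none => some x
  | some m => if (decide (f m < f x) || !decide (f x < f m) && decide (-m < -x)) = true then some x else some m

lemma pvMax2_eq_fold (xs : List Int) (f : Int → Int) :
    PySem.List.max2? xs f (fun x => -x) = xs.foldl (pvStep f) none := by
  unfold PySem.List.max2?
  congr 1
  funext acc x
  cases acc <;> simp [pvStep]

lemma pvFoldSpec (f : Int → Int) :
    ∀ (t : List Int) (a : Int), ∃ m, t.foldl (pvStep f) (some a) = some m ∧
      (m = a ∨ m ∈ t) ∧ pvKeyLe f a m ∧ ∀ y ∈ t, pvKeyLe f y m := by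
  intro t
  induction t with
  | nil => exact fun a => ⟨a, rfl, Or.inl rfl, pvKeyLe_refl f a, by simp⟩
  | cons x t ih =>
    intro a
    have hstep : ∃ a', pvStep f (some a) x = some a' ∧ (a' = a ∨ a' = x) ∧
        pvKeyLe f a a' ∧ pvKeyLe f x a' := by
      unfold pvStep
      by_cases hc : (decide (f a < f x) || !decide (f x < f a) && decide (-a < -x)) = true
      · refine ⟨x, by show (if _ then some x else some a) = some x; rw [if_pos hc], Or.inr rfl, ?_, pvKeyLe_refl f x⟩
        simp only [Bool.or_eq_true, Bool.and_eq_true, Bool.not_eq_true', decide_eq_true_eq,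
          decide_eq_false_iff_not] at hc
        unfold pvKeyLe; omega
      · refine ⟨a, by show (if _ then some x else some a) = some a; rw [if_neg hc], Or.inl rfl, pvKeyLe_refl f a, ?_⟩
        simp only [Bool.or_eq_true, Bool.and_eq_true, Bool.not_eq_true', decide_eq_true_eq,
          decide_eq_false_iff_not] at hc
        push Not at hc
        unfold pvKeyLe; omega
    obtain ⟨a', hstep, ha', haa', hxa'⟩ := hstep
    obtain ⟨m, hm, hmem, hle, hall⟩ := ih a'
    refine ⟨m, by simpa [hstep] using hm, ?_, pvKeyLe_trans f haa' hle, ?_⟩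
    · rcases hmem with h | h
      · rcases ha' with h' | h'
        · exact Or.inl (h ▸ h')
        · exact Or.inr (by simp [h, h'])
      · exact Or.inr (by simp [h])
    · intro y hy
      rcases List.mem_cons.mp hy with h | h
      · exact h ▸ pvKeyLe_trans f hxa' hle
      · exact hall y h

lemma pvMax2Spec (f : Int → Int) (xs : List Int) (hxs : xs ≠ []) :
    ∃ m, PySem.List.max2? xs f (fun x => -x) = some m ∧ m ∈ xs ∧ ∀ y ∈ xs, pvKeyLe f y m := by
  rw [pvMax2_eq_fold]
  match xs, hxs with
  | x :: t, _ =>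
    have h0 : pvStep f none x = some x := rfl
    obtain ⟨m, hm, hmem, hle, hall⟩ := pvFoldSpec f t x
    refine ⟨m, by simpa [h0] using hm, ?_, ?_⟩
    · rcases hmem with h | h
      · simp [h]
      · simp [h]
    · intro y hy
      rcases List.mem_cons.mp hy with h | h
      · exact h ▸ hle
      · exact hall y h

lemma pvMax2_congr (xs ys : List Int) (f g : Int → Int)
    (hmem : ∀ x, x ∈ xs ↔ x ∈ ys) (hfg : ∀ x ∈ xs, f x = g x) :
    PySem.List.max2? xs f (fun x => -x) = PySem.List.max2? ys g (fun x => -x) := by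
  cases xs with
  | nil =>
    have : ys = [] := by
      cases ys with
      | nil => rfl
      | cons y t => exact absurd ((hmem y).mpr (by simp)) (by simp)
    subst this; rfl
  | cons x t =>
    have hys : ys ≠ [] := by
      intro h
      exact absurd ((hmem x).mp (by simp)) (by simp [h])
    obtain ⟨m1, hm1, hm1mem, hm1all⟩ := pvMax2Spec f (x :: t) (by simp)
    obtain ⟨m2, hm2, hm2mem, hm2all⟩ := pvMax2Spec g ys hys
    have hm2mem' : m2 ∈ x :: t := (hmem m2).mpr hm2mem
    have e1 : m1 = m2 := by
      apply pvKeyLe_antisymm f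
      · -- pvKeyLe f m1 m2 from g-spec
        have := hm2all m1 ((hmem m1).mp hm1mem)
        unfold pvKeyLe at this ⊢
        rw [hfg m1 hm1mem, hfg m2 hm2mem']
        exact this
      · exact hm1all m2 hm2mem'
    rw [hm1, hm2, e1]

lemma pvGetD_foldl_insert_not_mem (F : Int → Int) (l : List Int) (d : PySem.Dict Int Int)
    (x : Int) (hx : x ∉ l) :
    (l.foldl (fun d y => d.insert y (F y)) d).getD x 0 = d.getD x 0 := by
  induction l generalizing d with
  | nil => rfl
  | cons y t ih =>
    simp only [List.mem_cons, not_or] at hx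
    simp only [List.foldl_cons]
    rw [ih _ hx.2, PySem.Dict.getD_insert_of_ne _ _ _ hx.1]

lemma pvGetD_foldl_insert_mem (F : Int → Int) (l : List Int) (d : PySem.Dict Int Int)
    (x : Int) (hx : x ∈ l) :
    (l.foldl (fun d y => d.insert y (F y)) d).getD x 0 = F x := by
  induction l generalizing d with
  | nil => simp at hx
  | cons y t ih =>
    by_cases hxt : x ∈ t
    · exact ih _ hxt
    · have hxy : x = y := by rcases List.mem_cons.mp hx with h | h; exact h; exact absurd h hxt
      subst hxy
      simp only [List.foldl_cons]
      rw [pvGetD_foldl_insert_not_mem F t _ x hxt, PySem.Dict.getD_insert_self]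

lemma pvSize_foldl_insert (F : Int → Int) (l : List Int) (d : PySem.Dict Int Int) :
    d.size ≤ (l.foldl (fun d y => d.insert y (F y)) d).size := by
  induction l generalizing d with
  | nil => simp
  | cons y t ih =>
    refine le_trans ?_ (ih (d.insert y (F y)))
    rw [PySem.Dict.size_insert]
    split <;> omega

def pvUpd (d : PySem.Dict Int Int) (x : Option Int) : PySem.Dict Int Int :=
  match x with
  | none => d
  | some o => d.insert o (d.getD o 0 + 1)

lemma pvFoldUpd_filterMap : ∀ (l : List (Option Int)) (d : PySem.Dict Int Int),
    l.foldl pvUpd d = (l.filterMap id).foldl (fun d o => d.insert o (d.getD o 0 + 1)) d := by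
  intro l
  induction l with
  | nil => intro d; rfl
  | cons x t ih =>
    intro d
    cases x with
    | none => simpa [pvUpd] using ih d
    | some o => simpa [pvUpd] using ih (d.insert o (d.getD o 0 + 1))

lemma pvPySetD_natCast {α : Type} (xs : List α) (s : Nat) (v : α) (hs : s < xs.length) :
    PySem.List.pySetD xs (s : Int) v = xs.set s v := by
  have h1 : (0:Int) ≤ (s:Int) := by omega
  have h2 : (s:Int) < (xs.length : Int) := by omega
  simp [PySem.List.pySetD, PySem.List.pySet?, PySem.List.pyIdx?, h1, h2]

lemma pvEnumFold {α : Type} (h : α → Option Int) :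
    ∀ (l : List α) (st : List (PySem.Dict Int Int)) (s : Nat),
      s + l.length ≤ st.length →
      ((PySem.List.enumerate l (s : Int)).foldl
        (fun st p =>
          match h p.2 with
          | none => st
          | some o =>
            PySem.List.pySetD st p.1
              ((PySem.List.pyGetD st p.1 PySem.Dict.empty).insert o
                ((PySem.List.pyGetD st p.1 PySem.Dict.empty).getD o 0 + 1))) st).length = st.length ∧
      ∀ j : Nat, j < st.length →
      ((PySem.List.enumerate l (s : Int)).foldl
        (fun st p =>
          match h p.2 with
          | none => st
          | some o =>
            PySem.List.pySetD st p.1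
              ((PySem.List.pyGetD st p.1 PySem.Dict.empty).insert o
                ((PySem.List.pyGetD st p.1 PySem.Dict.empty).getD o 0 + 1))) st).getD j PySem.Dict.empty
      = if s ≤ j ∧ j < s + l.length
        then pvUpd (st.getD j PySem.Dict.empty) ((l.map h).getD (j - s) none)
        else st.getD j PySem.Dict.empty := by
  intro l
  induction l with
  | nil =>
    intro st s hlen
    refine ⟨by simp [PySem.List.enumerate_nil], ?_⟩
    intro j hj
    rw [PySem.List.enumerate_nil]
    simp only [List.foldl_nil, List.length_nil]
    rw [if_neg (by omega)]
  | cons a t ih =>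
    intro st s hlen
    rw [PySem.List.enumerate_cons]
    have hcast : (s : Int) + 1 = ((s + 1 : Nat) : Int) := by push_cast; ring
    simp only [List.foldl_cons, hcast]
    cases hha : h a with
    | none =>
      simp only []
      obtain ⟨ihlen, ihget⟩ := ih st (s + 1) (by simp at hlen ⊢; omega)
      refine ⟨ihlen, ?_⟩
      intro j hj
      rw [ihget j hj]
      by_cases hjs : j = s
      · rw [if_neg (by omega), if_pos (by simp; omega)]
        have h0 : j - s = 0 := by omega
        rw [h0]
        simp [hha, pvUpd]
      · by_cases hr : s + 1 ≤ j ∧ j < s + 1 + t.length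
        · rw [if_pos hr, if_pos (by simp; omega)]
          have : j - s = (j - (s + 1)) + 1 := by omega
          rw [this]
          simp
        · rw [if_neg hr, if_neg (by simp; omega)]
    | some o =>
      simp only []
      have hslt : s < st.length := by simp at hlen; omega
      have hget : PySem.List.pyGetD st ((s : Int)) PySem.Dict.empty = st.getD s PySem.Dict.empty := by
        simp
      rw [hget, pvPySetD_natCast st s _ hslt]
      set v : PySem.Dict Int Int := (st.getD s PySem.Dict.empty).insert o ((st.getD s PySem.Dict.empty).getD o 0 + 1) with hv
      obtain ⟨ihlen, ihget⟩ := ih (st.set s v) (s + 1) (by simp at hlen ⊢; omega)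
      refine ⟨by rw [ihlen]; simp, ?_⟩
      intro j hj
      rw [ihget j (by simp; omega)]
      have hsetget : ∀ k : Nat, k < st.length → (st.set s v).getD k PySem.Dict.empty
          = if k = s then v else st.getD k PySem.Dict.empty := by
        intro k hk
        by_cases hks : k = s
        · rw [if_pos hks, hks]
          rw [List.getD_eq_getElem?_getD, List.getElem?_set]
          have hsl : s < st.length := by omega
          simp [hsl]
        · rw [if_neg hks]
          rw [List.getD_eq_getElem?_getD, List.getElem?_set, List.getD_eq_getElem?_getD]
          have : ¬ (s = k) := fun h => hks h.symm
          simp [this]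
      by_cases hjs : j = s
      · rw [if_neg (by omega), hsetget j hj, if_pos hjs]
        rw [if_pos (by simp; omega)]
        have h0 : j - s = 0 := by omega
        rw [h0, hjs]
        simp [hha, pvUpd, hv]
      · rw [hsetget j hj, if_neg hjs]
        by_cases hr : s + 1 ≤ j ∧ j < s + 1 + t.length
        · rw [if_pos hr, if_pos (by simp at hr ⊢; omega)]
          have : j - s = (j - (s + 1)) + 1 := by omega
          rw [this]
          simp
        · rw [if_neg hr, if_neg (by simp at hr ⊢; omega)]

-- column counts characterization
lemma pvColCountsChar (R : List (List (Option Int))) (m : Nat) (hR : ∀ row ∈ R, row.length = m)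
    (j : Nat) (hj : j < m) :
    ((PySem.List.pyRange 0 (PySem.List.len R) 1).foldl (fun cc t =>
        (PySem.List.pyRange 0 ((m : Nat) : Int) 1).foldl (fun cc c =>
          match PySem.List.pyGetD (PySem.List.pyGetD R t []) c none with
          | none => cc
          | some o =>
            PySem.List.pySetD cc c
              ((PySem.List.pyGetD cc c PySem.Dict.empty).insert o
                ((PySem.List.pyGetD cc c PySem.Dict.empty).getD o 0 + 1))) cc)
        ((PySem.List.pyRange 0 ((m : Nat) : Int) 1).map (fun _ => (PySem.Dict.empty : PySem.Dict Int Int)))).getD j PySem.Dict.empty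
    = PySem.Dict.counter ((R.map (fun row => row.getD j none)).filterMap id) := by
  -- outer loop over pyRange = foldl over R itself
  have houter := PySem.List.foldl_pyRange_zero_pyGetD' R ([] : List (Option Int))
    (fun cc row =>
      (PySem.List.pyRange 0 ((m : Nat) : Int) 1).foldl (fun cc c =>
        match PySem.List.pyGetD row c none with
        | none => cc
        | some o =>
          PySem.List.pySetD cc c
            ((PySem.List.pyGetD cc c PySem.Dict.empty).insert o
              ((PySem.List.pyGetD cc c PySem.Dict.empty).getD o 0 + 1))) cc)
    ((PySem.List.pyRange 0 ((m : Nat) : Int) 1).map (fun _ => (PySem.Dict.empty : PySem.Dict Int Int)))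
  simp only [PySem.List.len_eq]
  rw [houter]
  -- generalized outer induction
  have hinit : ((PySem.List.pyRange 0 ((m : Nat) : Int) 1).map
      (fun _ => (PySem.Dict.empty : PySem.Dict Int Int))).length = m := by
    simp [PySem.List.length_pyRange_one]
  suffices H : ∀ (rows : List (List (Option Int))) (st : List (PySem.Dict Int Int)),
      (∀ row ∈ rows, row.length = m) → st.length = m →
      (rows.foldl (fun cc row =>
        (PySem.List.pyRange 0 ((m : Nat) : Int) 1).foldl (fun cc c =>
          match PySem.List.pyGetD row c none with
          | none => cc
          | some o =>
            PySem.List.pySetD cc c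
              ((PySem.List.pyGetD cc c PySem.Dict.empty).insert o
                ((PySem.List.pyGetD cc c PySem.Dict.empty).getD o 0 + 1))) cc) st).getD j PySem.Dict.empty
      = rows.foldl (fun d row => pvUpd d (row.getD j none)) (st.getD j PySem.Dict.empty) by
    rw [H R _ hR hinit]
    have hinitj : ((PySem.List.pyRange 0 ((m : Nat) : Int) 1).map
        (fun _ => (PySem.Dict.empty : PySem.Dict Int Int))).getD j PySem.Dict.empty
        = PySem.Dict.empty := by
      rcases lt_or_ge j ((PySem.List.pyRange 0 ((m : Nat) : Int) 1).map
        (fun _ => (PySem.Dict.empty : PySem.Dict Int Int))).length with hlt | hge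
      · rw [List.getD_eq_getElem?_getD, List.getElem?_eq_getElem hlt]
        simp
      · rw [List.getD_eq_getElem?_getD, List.getElem?_eq_none (by omega)]
        rfl
    rw [hinitj]
    have : (fun (d : PySem.Dict Int Int) (row : List (Option Int)) => pvUpd d (row.getD j none))
        = fun d row => pvUpd d ((fun row => row.getD j none) row) := rfl
    rw [this, ← List.foldl_map, pvFoldUpd_filterMap, PySem.Dict.foldl_insert_getD_add_one_eq_counter]
  intro rows
  induction rows with
  | nil => intro st _ _; rfl
  | cons row rest ihr =>
    intro st hrows hst
    simp only [List.foldl_cons]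
    -- the inner loop on `row`
    have hrow : row.length = m := hrows row (by simp)
    have hrange : PySem.List.pyRange 0 ((m : Nat) : Int) 1 = PySem.List.pyRange 0 (PySem.List.len row) 1 := by
      simp [PySem.List.len_eq, hrow]
    have hmap := PySem.List.enumerate_eq_map_pyRange row none
    have hinner : (PySem.List.pyRange 0 ((m : Nat) : Int) 1).foldl (fun cc c =>
          match PySem.List.pyGetD row c none with
          | none => cc
          | some o =>
            PySem.List.pySetD cc c
              ((PySem.List.pyGetD cc c PySem.Dict.empty).insert o
                ((PySem.List.pyGetD cc c PySem.Dict.empty).getD o 0 + 1))) st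
        = (PySem.List.enumerate row ((0 : Nat) : Int)).foldl
          (fun st p =>
            match (fun (x : Option Int) => x) p.2 with
            | none => st
            | some o =>
              PySem.List.pySetD st p.1
                ((PySem.List.pyGetD st p.1 PySem.Dict.empty).insert o
                  ((PySem.List.pyGetD st p.1 PySem.Dict.empty).getD o 0 + 1))) st := by
      rw [hrange]
      have : PySem.List.enumerate row ((0 : Nat) : Int) = PySem.List.enumerate row := by norm_num
      rw [this, hmap, List.foldl_map]
    rw [hinner]
    obtain ⟨hlen, hget⟩ := pvEnumFold (fun (x : Option Int) => x) row st 0 (by omega)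
    have hst' : ((PySem.List.enumerate row ((0 : Nat) : Int)).foldl
          (fun st p =>
            match (fun (x : Option Int) => x) p.2 with
            | none => st
            | some o =>
              PySem.List.pySetD st p.1
                ((PySem.List.pyGetD st p.1 PySem.Dict.empty).insert o
                  ((PySem.List.pyGetD st p.1 PySem.Dict.empty).getD o 0 + 1))) st).length = m := by
      rw [hlen, hst]
    rw [ihr _ (fun r hr => hrows r (by simp [hr])) hst']
    rw [hget j (by omega)]
    rw [if_pos (by omega)]
    have : (row.map (fun (x : Option Int) => x)).getD (j - 0) none = row.getD j none := by
      simp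
    rw [this]

-- row counts characterization
lemma pvRowCountsChar (R : List (List (Option Int))) (m : Nat) (hR : ∀ row ∈ R, row.length = m)
    (t : Nat) (ht : t < R.length) :
    ((PySem.List.pyRange 0 ((m : Nat) : Int) 1).foldl (fun rc c =>
        (PySem.List.pyRange 0 (PySem.List.len R) 1).foldl (fun rc tt =>
          match PySem.List.pyGetD (PySem.List.pyGetD R tt []) c none with
          | none => rc
          | some o =>
            PySem.List.pySetD rc tt
              ((PySem.List.pyGetD rc tt PySem.Dict.empty).insert o
                ((PySem.List.pyGetD rc tt PySem.Dict.empty).getD o 0 + 1))) rc)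
        ((PySem.List.pyRange 0 (PySem.List.len R) 1).map (fun _ => (PySem.Dict.empty : PySem.Dict Int Int)))).getD t PySem.Dict.empty
    = PySem.Dict.counter ((R.getD t []).filterMap id) := by
  have hinner : ∀ (c : Int) (rc : List (PySem.Dict Int Int)),
      (PySem.List.pyRange 0 (PySem.List.len R) 1).foldl (fun rc tt =>
        match PySem.List.pyGetD (PySem.List.pyGetD R tt []) c none with
        | none => rc
        | some o =>
          PySem.List.pySetD rc tt
            ((PySem.List.pyGetD rc tt PySem.Dict.empty).insert o
              ((PySem.List.pyGetD rc tt PySem.Dict.empty).getD o 0 + 1))) rc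
      = (PySem.List.enumerate R ((0 : Nat) : Int)).foldl
          (fun st p =>
            match (fun (row : List (Option Int)) => PySem.List.pyGetD row c none) p.2 with
            | none => st
            | some o =>
              PySem.List.pySetD st p.1
                ((PySem.List.pyGetD st p.1 PySem.Dict.empty).insert o
                  ((PySem.List.pyGetD st p.1 PySem.Dict.empty).getD o 0 + 1))) rc := by
    intro c rc
    have h0 : PySem.List.enumerate R ((0 : Nat) : Int) = PySem.List.enumerate R := by norm_num
    rw [h0, PySem.List.enumerate_eq_map_pyRange R [], List.foldl_map]
  -- generalized over the list of columns
  suffices H : ∀ (cs : List Int) (st : List (PySem.Dict Int Int)), st.length = R.length →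
      (cs.foldl (fun rc c =>
        (PySem.List.pyRange 0 (PySem.List.len R) 1).foldl (fun rc tt =>
          match PySem.List.pyGetD (PySem.List.pyGetD R tt []) c none with
          | none => rc
          | some o =>
            PySem.List.pySetD rc tt
              ((PySem.List.pyGetD rc tt PySem.Dict.empty).insert o
                ((PySem.List.pyGetD rc tt PySem.Dict.empty).getD o 0 + 1))) rc) st).getD t PySem.Dict.empty
      = cs.foldl (fun d c => pvUpd d (PySem.List.pyGetD (R.getD t []) c none)) (st.getD t PySem.Dict.empty) by
    have hinit : ((PySem.List.pyRange 0 (PySem.List.len R) 1).map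
        (fun _ => (PySem.Dict.empty : PySem.Dict Int Int))).length = R.length := by
      simp [PySem.List.len_eq, PySem.List.length_pyRange_one]
    rw [H _ _ hinit]
    have hinitt : ((PySem.List.pyRange 0 (PySem.List.len R) 1).map
        (fun _ => (PySem.Dict.empty : PySem.Dict Int Int))).getD t PySem.Dict.empty = PySem.Dict.empty := by
      rw [List.getD_eq_getElem?_getD, List.getElem?_eq_getElem (by omega)]
      simp
    rw [hinitt]
    -- pyRange over the row's own length
    have hgetDt : R.getD t [] = R[t] := by
      rw [List.getD_eq_getElem?_getD, List.getElem?_eq_getElem ht]; rfl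
    have hrowlen : (R.getD t []).length = m := by
      rw [hgetDt]; exact hR _ (List.getElem_mem ht)
    have : PySem.List.pyRange 0 ((m : Nat) : Int) 1 = PySem.List.pyRange 0 ((R.getD t []).length : Int) 1 := by
      rw [hrowlen]
    rw [this, PySem.List.foldl_pyRange_zero_pyGetD' (R.getD t []) none pvUpd PySem.Dict.empty,
      pvFoldUpd_filterMap, PySem.Dict.foldl_insert_getD_add_one_eq_counter]
  intro cs
  induction cs with
  | nil => intro st _; rfl
  | cons c cs ihc =>
    intro st hst
    simp only [List.foldl_cons]
    rw [hinner c st]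
    obtain ⟨hlen, hget⟩ := pvEnumFold (fun (row : List (Option Int)) => PySem.List.pyGetD row c none) R st 0 (by omega)
    rw [ihc _ (by rw [hlen, hst])]
    have hval : (R.map (fun (row : List (Option Int)) => PySem.List.pyGetD row c none)).getD (t - 0) none
        = PySem.List.pyGetD (R.getD t []) c none := by
      have hgetDt : R.getD t [] = R[t] := by
        rw [List.getD_eq_getElem?_getD, List.getElem?_eq_getElem ht]; rfl
      rw [hgetDt]
      have ht0 : t - 0 = t := rfl
      rw [List.getD_eq_getElem?_getD, List.getElem?_map, ht0, List.getElem?_eq_getElem ht]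
      rfl
    rw [hget t (by omega), if_pos (by omega), hval]

lemma pvCell_counter (u v : List Int) (dv : Int) :
    (if ((PySem.Set.union (PySem.Set.ofList (PySem.Dict.counter u).keys) (PySem.Dict.counter v).keys).foldl
          (fun d x => d.insert x ((PySem.Dict.counter u).getD x 0 + (PySem.Dict.counter v).getD x 0))
          PySem.Dict.empty).size = 0
     then dv
     else (PySem.List.max2?
            (PySem.Set.union (PySem.Set.ofList (PySem.Dict.counter u).keys) (PySem.Dict.counter v).keys)
            (fun x => ((PySem.Set.union (PySem.Set.ofList (PySem.Dict.counter u).keys) (PySem.Dict.counter v).keys).foldl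
              (fun d x => d.insert x ((PySem.Dict.counter u).getD x 0 + (PySem.Dict.counter v).getD x 0))
              PySem.Dict.empty).getD x 0)
            (fun x => -x)).getD dv)
    = pvVote (u ++ v) dv := by
  set S : List Int := PySem.Set.union (PySem.Set.ofList (PySem.Dict.counter u).keys) (PySem.Dict.counter v).keys with hS
  set F : Int → Int := fun x => (PySem.Dict.counter u).getD x 0 + (PySem.Dict.counter v).getD x 0 with hF
  have hmemS : ∀ x, x ∈ S ↔ x ∈ u ++ v := by
    intro x
    rw [hS]
    unfold PySem.Set.union
    rw [PySem.Dict.keys_counter, PySem.Dict.keys_counter, PySem.Set.ofList_ofList]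
    rw [PySem.Set.mem_update]
    simp [PySem.Set.mem_ofList, List.mem_append]
  by_cases h : u ++ v = []
  · obtain ⟨hu, hv⟩ := List.append_eq_nil_iff.mp h
    subst hu hv
    rfl
  · obtain ⟨x, hx⟩ := List.exists_mem_of_ne_nil _ h
    have hxS : x ∈ S := (hmemS x).mpr hx
    have hSne : S ≠ [] := List.ne_nil_of_mem hxS
    have hsize : ((S.foldl (fun d x => d.insert x (F x)) PySem.Dict.empty)).size ≠ 0 := by
      obtain ⟨a, S', hcons⟩ := List.exists_cons_of_ne_nil hSne
      rw [hcons]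
      have h1 : (PySem.Dict.empty.insert a (F a) : PySem.Dict Int Int).size = 1 := by
        rw [PySem.Dict.size_insert]
        simp
      have := pvSize_foldl_insert F S' (PySem.Dict.empty.insert a (F a))
      simp only [List.foldl_cons]
      omega
    rw [if_neg hsize]
    unfold pvVote
    rw [if_neg h]
    have h1 : PySem.List.max2? S
        (fun x => ((S.foldl (fun d x => d.insert x (F x)) PySem.Dict.empty)).getD x 0) (fun x => -x)
        = PySem.List.max2? (u ++ v) (fun x => (((u ++ v).count x : Nat) : Int)) (fun x => -x) := by
      apply pvMax2_congr S (u ++ v) _ _ hmemS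
      intro x hxS
      rw [pvGetD_foldl_insert_mem F S PySem.Dict.empty x hxS, hF]
      simp only [PySem.Dict.getD_counter]
      rw [List.count_append]
      push_cast
      ring
    have h2 : PySem.List.max2? (PySem.Dict.counter (u ++ v)).keys
        (fun x => (PySem.Dict.counter (u ++ v)).getD x 0) (fun x => -x)
        = PySem.List.max2? (u ++ v) (fun x => (((u ++ v).count x : Nat) : Int)) (fun x => -x) := by
      apply pvMax2_congr
      · intro x
        rw [PySem.Dict.keys_counter, PySem.Set.mem_ofList]
      · intro x _
        simp only [PySem.Dict.getD_counter]
    rw [h1, h2]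

lemma pvFoldMin (n : Nat) : ∀ (l : List (List (Option Int))), (∀ row ∈ l, row.length = n) →
    l.foldl (fun m row => min m row.length) n = n := by
  intro l
  induction l with
  | nil => intro _; rfl
  | cons r rs ih =>
    intro h
    simp only [List.foldl_cons, h r (by simp), min_self]
    exact ih (fun row hr => h row (by simp [hr]))

lemma pvZipStar_rect (r : List (Option Int)) (rs : List (List (Option Int)))
    (hrect : ∀ row ∈ r :: rs, row.length = r.length) :
    pvZipStar (r :: rs)
      = (List.range r.length).map (fun j => (r :: rs).map (fun row => row.getD j none)) := by
  simp only [pvZipStar]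
  rw [pvFoldMin r.length rs (fun row hr => hrect row (by simp [hr]))]

lemma pvCell_counter_col (v : List Int) (dv : Int) :
    (if ((PySem.Set.union (PySem.Set.ofList (PySem.Dict.empty : PySem.Dict Int Int).keys) (PySem.Dict.counter v).keys).foldl
          (fun d x => d.insert x ((PySem.Dict.empty : PySem.Dict Int Int).getD x 0 + (PySem.Dict.counter v).getD x 0))
          PySem.Dict.empty).size = 0
     then dv
     else (PySem.List.max2?
            (PySem.Set.union (PySem.Set.ofList (PySem.Dict.empty : PySem.Dict Int Int).keys) (PySem.Dict.counter v).keys)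
            (fun x => ((PySem.Set.union (PySem.Set.ofList (PySem.Dict.empty : PySem.Dict Int Int).keys) (PySem.Dict.counter v).keys).foldl
              (fun d x => d.insert x ((PySem.Dict.empty : PySem.Dict Int Int).getD x 0 + (PySem.Dict.counter v).getD x 0))
              PySem.Dict.empty).getD x 0)
            (fun x => -x)).getD dv)
    = pvVote v dv := pvCell_counter [] v dv

lemma pvCell_counter_row (u : List Int) (dv : Int) :
    (if ((PySem.Set.union (PySem.Set.ofList (PySem.Dict.counter u).keys) (PySem.Dict.empty : PySem.Dict Int Int).keys).foldl
          (fun d x => d.insert x ((PySem.Dict.counter u).getD x 0 + (PySem.Dict.empty : PySem.Dict Int Int).getD x 0))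
          PySem.Dict.empty).size = 0
     then dv
     else (PySem.List.max2?
            (PySem.Set.union (PySem.Set.ofList (PySem.Dict.counter u).keys) (PySem.Dict.empty : PySem.Dict Int Int).keys)
            (fun x => ((PySem.Set.union (PySem.Set.ofList (PySem.Dict.counter u).keys) (PySem.Dict.empty : PySem.Dict Int Int).keys).foldl
              (fun d x => d.insert x ((PySem.Dict.counter u).getD x 0 + (PySem.Dict.empty : PySem.Dict Int Int).getD x 0))
              PySem.Dict.empty).getD x 0)
            (fun x => -x)).getD dv)
    = pvVote u dv := by
  have h := pvCell_counter u [] dv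
  rw [List.append_nil] at h
  exact h

lemma pv_main_eq (interactions : List (List (Option Int))) (kind : String) (default_value : Int)
    (hne : interactions ≠ [])
    (hrect : ∀ row ∈ interactions, row.length = (interactions.headD []).length) :
    maj_approx_strategy interactions kind default_value
      = maj_approx_strategy_alt interactions kind default_value := by
  cases interactions with
  | nil => exact absurd rfl hne
  | cons r rs =>
    have hm : ∀ row ∈ (r :: rs), row.length = r.length := by
      simpa using hrect
    simp only [maj_approx_strategy, maj_approx_strategy_alt]
    have hncols : PySem.List.len (PySem.List.pyGetD (r :: rs) 0 []) = ((r.length : Nat) : Int) := by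
      rw [PySem.List.pyGetD_zero_cons]
      simp [PySem.List.len_eq]
    rw [hncols, pvZipStar_rect r rs hm]
    apply PySem.List.foldl_congr_mem
    intro acc p hp
    rcases (PySem.List.mem_enumerate_iff _ _ _).mp hp with ⟨k, hk, rfl⟩
    simp only [zero_add]
    apply PySem.List.foldl_congr_mem
    intro acc2 q hq
    rcases (PySem.List.mem_enumerate_iff _ _ _).mp hq with ⟨j, hj, rfl⟩
    simp only [zero_add]
    cases hx : ((r :: rs)[k])[j] with
    | some o => rfl
    | none =>
      simp only []
      congr 1
      simp only [PySem.List.pyGetD_natCast]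
      rw [pvRowCountsChar (r :: rs) r.length hm k hk,
        pvColCountsChar (r :: rs) r.length hm j (by rw [← hm _ (List.getElem_mem hk)]; exact hj)]
      have hjm : j < r.length := by rw [← hm _ (List.getElem_mem hk)]; exact hj
      have hRk : (r :: rs).getD k [] = (r :: rs)[k] := by
        rw [List.getD_eq_getElem?_getD, List.getElem?_eq_getElem hk]; rfl
      have hBcol : (List.map (fun v => pvVote v default_value)
            (List.map (fun col => List.filterMap id col)
              (List.map (fun j => List.map (fun row => row.getD j none) (r :: rs)) (List.range r.length)))).getD
          j default_value
          = pvVote (List.filterMap id (List.map (fun row => row.getD j none) (r :: rs))) default_value := by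
        simp only [List.map_map]
        rw [List.getD_eq_getElem?_getD, List.getElem?_map, List.getElem?_range hjm]
        rfl
      have hBrow : (List.map (fun v => pvVote v default_value)
            (List.map (fun col => List.filterMap id col) (r :: rs))).getD k default_value
          = pvVote (List.filterMap id ((r :: rs)[k])) default_value := by
        simp only [List.map_map]
        rw [List.getD_eq_getElem?_getD, List.getElem?_map, List.getElem?_eq_getElem hk]
        rfl
      have hBrowV : (List.map (fun row => List.filterMap id row) (r :: rs)).getD k []
          = List.filterMap id ((r :: rs)[k]) := by
        rw [List.getD_eq_getElem?_getD, List.getElem?_map, List.getElem?_eq_getElem hk]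
        rfl
      have hBcolV : (List.map (fun col => List.filterMap id col)
            (List.map (fun j => List.map (fun row => row.getD j none) (r :: rs)) (List.range r.length))).getD j []
          = List.filterMap id (List.map (fun row => row.getD j none) (r :: rs)) := by
        simp only [List.map_map]
        rw [List.getD_eq_getElem?_getD, List.getElem?_map, List.getElem?_range hjm]
        rfl
      by_cases hc : kind = "column"
      · rw [if_neg (show ¬ kind ≠ "column" by simp [hc]), if_pos (show kind ≠ "row" by simp [hc]),
          if_pos hc, hBcol]
        exact congrArg (fun z => [z]) (pvCell_counter_col _ _)
      · by_cases hr : kind = "row"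
        · rw [if_pos (show kind ≠ "column" by simp [hc]), if_neg (show ¬ kind ≠ "row" by simp [hr]),
            if_neg hc, if_pos hr, hBrow, hRk]
          exact congrArg (fun z => [z]) (pvCell_counter_row _ _)
        · rw [if_pos (show kind ≠ "column" by simp [hc]), if_pos (show kind ≠ "row" by simp [hr]),
            if_neg hc, if_neg hr, hBrowV, hBcolV, hRk]
          exact congrArg (fun z => [z]) (pvCell_counter _ _ _)

-- ===== VERDICT (by name: the statement is the Claim_ definition above) =====
theorem maj_approx_strategy_spec : Claim_equal_maj_approx_strategy := by
  intro interactions kind default_value _ hpre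
  unfold Spec_maj_approx_strategy
  exact pv_main_eq interactions kind default_value hpre.1 hpre.2
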